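-- pv_equiv track=rewrite | github.com/HJ1X/dsa-450 | string/expressive_words.py | is_stretchy
-- ===== SOURCE A (Python) =====
-- def is_stretchy(stretchy_word, string):
--     if not stretchy_word and string or not string and stretchy_word:
--         return False
--
--     if not stretchy_word and not string:
--         return True
--
--     i, j = 0, 0
--     curr_char = stretchy_word[i]
--     while i < len(stretchy_word) and stretchy_word[i] == curr_char:
--         i += 1
--
--     while j < len(string) and string[j] == curr_char:
--         j += 1
--
--     if i == j or j >= 3:
--         return is_stretchy(stretchy_word[i:], string[j:])
--
--     else:
--         return False
-- ===== SOURCE B (Python) =====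
-- def is_stretchy(stretchy_word, string):
--     n, m = len(stretchy_word), len(string)
--     i = j = 0
--     while i < n and j < m:
--         c = stretchy_word[i]
--         i2 = i
--         while i2 < n and stretchy_word[i2] == c:
--             i2 += 1
--         j2 = j
--         while j2 < m and string[j2] == c:
--             j2 += 1
--         if i2 - i != j2 - j and j2 - j < 3:
--             return False
--         i, j = i2, j2
--     return i == n and j == m
-- ===== Notes on version B (the rewrite author's own statement) =====
-- stated objective: faster
-- what changed: Replaced A's recursion with string slicing at every step by a single iterative two-pointer pass over both strings using indices, so no substrings are ever copied (A's slicing is quadratic in the worst case of many short runs).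
import Mathlib
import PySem

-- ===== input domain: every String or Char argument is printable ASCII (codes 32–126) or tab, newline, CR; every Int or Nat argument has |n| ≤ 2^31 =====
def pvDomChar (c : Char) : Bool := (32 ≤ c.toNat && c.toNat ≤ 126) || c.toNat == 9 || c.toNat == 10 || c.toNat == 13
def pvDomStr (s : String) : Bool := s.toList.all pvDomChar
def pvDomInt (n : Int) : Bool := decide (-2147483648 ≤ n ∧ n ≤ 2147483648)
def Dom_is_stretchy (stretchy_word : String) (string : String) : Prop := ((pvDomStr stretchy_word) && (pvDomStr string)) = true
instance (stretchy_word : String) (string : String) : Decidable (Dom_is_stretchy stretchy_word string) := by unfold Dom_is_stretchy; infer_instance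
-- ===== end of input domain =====

-- B replaces A's recursive slicing with one iterative index-based two-pointer pass (objective: faster, no substring copies).

-- ===== PORT A =====
-- the 'while … == curr_char: i += 1' loop of A: length of the run of c at the front
def pvRun (c : Char) : List Char → Nat
  | [] => 0
  | x :: xs => if x == c then pvRun c xs + 1 else 0

def pvGoA (w s : List Char) : Bool :=
  if (w.isEmpty && !s.isEmpty) || (s.isEmpty && !w.isEmpty) then false
  else if w.isEmpty && s.isEmpty then true
  else
    let c := w.getD 0 ' '   -- curr_char = stretchy_word[0]; w is nonempty here
    let i := pvRun c w
    let j := pvRun c s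
    if i = j ∨ 3 ≤ j then pvGoA (w.drop i) (s.drop j) else false
termination_by w.length
decreasing_by
  match w, s with
  | [], [] => simp at *
  | [], _ :: _ => simp at *
  | c0 :: wrest, _ =>
    simp only [List.getD_cons_zero, List.length_drop, pvRun, beq_self_eq_true, if_true]
    simp only [List.length_cons]
    omega

def is_stretchy (stretchy_word : String) (string : String) : Bool :=
  pvGoA stretchy_word.toList string.toList

-- ===== PORT B =====
-- the inner 'while k < len and l[k] == c: k += 1' loop of B
def pvScan (l : List Char) (len : Nat) (c : Char) (k : Nat) : Nat :=
  if k < len ∧ l.getD k ' ' = c then pvScan l len c (k + 1) else k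
termination_by len - k
decreasing_by omega

theorem le_pvScan (l : List Char) (len : Nat) (c : Char) (k : Nat) : k ≤ pvScan l len c k := by
  rw [pvScan]
  split
  · have := le_pvScan l len c (k + 1); omega
  · exact Nat.le_refl _
termination_by len - k
decreasing_by omega

-- the outer 'while i < n and j < m' loop of B
def pvLoop (wl sl : List Char) (n m i j : Nat) : Bool :=
  if h : i < n ∧ j < m then
    let c := wl.getD i ' '
    let i2 := pvScan wl n c i
    let j2 := pvScan sl m c j
    if i2 - i ≠ j2 - j ∧ j2 - j < 3 then false
    else pvLoop wl sl n m i2 j2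
  else i == n && j == m
termination_by n - i
decreasing_by
  have h1 : i + 1 ≤ pvScan wl n (wl.getD i ' ') i := by
    rw [pvScan, if_pos ⟨h.1, rfl⟩]
    exact le_pvScan wl n (wl.getD i ' ') (i + 1)
  omega

def is_stretchy_alt (stretchy_word : String) (string : String) : Bool :=
  let wl := stretchy_word.toList
  let sl := string.toList
  pvLoop wl sl wl.length sl.length 0 0

-- ===== PRECONDITION & SPEC =====
def Spec_is_stretchy (stretchy_word : String) (string : String) (out : Bool) : Prop := out = is_stretchy_alt stretchy_word string
instance (stretchy_word : String) (string : String) (out : Bool) : Decidable (Spec_is_stretchy stretchy_word string out) := by unfold Spec_is_stretchy; infer_instance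

-- ===== CLAIM (what is proved, stated in full; the proofs are below) =====
def Claim_equal_is_stretchy : Prop := ∀ (stretchy_word : String) (string : String), Dom_is_stretchy stretchy_word string → Spec_is_stretchy stretchy_word string (is_stretchy stretchy_word string)

-- ===== LEMMAS AND PROOFS =====

theorem pvRun_le (c : Char) (l : List Char) : pvRun c l ≤ l.length := by
  induction l with
  | nil => simp [pvRun]
  | cons x xs ih => rw [pvRun]; split <;> simp only [List.length_cons] <;> omega

theorem pvGoA_nil_nil : pvGoA [] [] = true := by rw [pvGoA]; simp

theorem pvGoA_nil_cons (c : Char) (rest : List Char) : pvGoA [] (c :: rest) = false := by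
  rw [pvGoA]; simp

theorem pvGoA_cons_nil (c : Char) (rest : List Char) : pvGoA (c :: rest) [] = false := by
  rw [pvGoA]; simp

theorem pvScan_eq (l : List Char) (c : Char) (k : Nat) (hk : k ≤ l.length) :
    pvScan l l.length c k = k + pvRun c (l.drop k) := by
  rw [pvScan]
  by_cases hlt : k < l.length
  · have hdrop : l.drop k = l[k] :: l.drop (k + 1) := List.drop_eq_getElem_cons hlt
    have hgd : l.getD k ' ' = l[k] := List.getD_eq_getElem l ' ' hlt
    by_cases hc : l[k] = c
    · rw [if_pos ⟨hlt, by rw [hgd, hc]⟩, pvScan_eq l c (k + 1) hlt, hdrop]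
      simp [pvRun, hc]
      omega
    · rw [if_neg (by rw [hgd]; exact fun h => hc h.2), hdrop]
      simp [pvRun, hc]
  · have hk' : k = l.length := by omega
    rw [if_neg (by omega)]
    simp [hk', pvRun]
termination_by l.length - k
decreasing_by omega

theorem pvLoop_eq (wl sl : List Char) (i j : Nat) (hi : i ≤ wl.length) (hj : j ≤ sl.length) :
    pvLoop wl sl wl.length sl.length i j = pvGoA (wl.drop i) (sl.drop j) := by
  rw [pvLoop]
  by_cases h : i < wl.length ∧ j < sl.length
  · rw [dif_pos h]
    rw [pvGoA]
    have hwd : wl.drop i = wl[i] :: wl.drop (i + 1) := List.drop_eq_getElem_cons h.1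
    have hsd : sl.drop j = sl[j] :: sl.drop (j + 1) := List.drop_eq_getElem_cons h.2
    have hc : (wl.drop i).getD 0 ' ' = wl.getD i ' ' := by
      rw [hwd, List.getD_cons_zero, List.getD_eq_getElem wl ' ' h.1]
    have hi2 : pvScan wl wl.length (wl.getD i ' ') i = i + pvRun (wl.getD i ' ') (wl.drop i) :=
      pvScan_eq wl _ i (le_of_lt h.1)
    have hj2 : pvScan sl sl.length (wl.getD i ' ') j = j + pvRun (wl.getD i ' ') (sl.drop j) :=
      pvScan_eq sl _ j (le_of_lt h.2)
    have hne1 : ((wl.drop i).isEmpty && !(sl.drop j).isEmpty) = false := by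
      simp only [hwd, List.isEmpty_cons, Bool.false_and]
    have hne2 : ((sl.drop j).isEmpty && !(wl.drop i).isEmpty) = false := by
      simp only [hsd, List.isEmpty_cons, Bool.false_and]
    have hne3 : ((wl.drop i).isEmpty && (sl.drop j).isEmpty) = false := by
      simp only [hwd, List.isEmpty_cons, Bool.false_and]
    rw [hne1, hne2, hne3]
    simp only [Bool.or_self]
    rw [hc, hi2, hj2]
    set rw_ := pvRun (wl.getD i ' ') (wl.drop i) with hrw
    set rs_ := pvRun (wl.getD i ' ') (sl.drop j) with hrs
    have hrw1 : 1 ≤ rw_ := by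
      rw [hrw, hwd, pvRun]
      rw [List.getD_eq_getElem wl ' ' h.1]
      simp
    have e1 : i + rw_ - i = rw_ := by omega
    have e2 : j + rs_ - j = rs_ := by omega
    rw [e1, e2]
    by_cases hcond : rw_ = rs_ ∨ 3 ≤ rs_
    · rw [if_neg (by omega), if_pos hcond]
      have hrwle : i + rw_ ≤ wl.length := by
        have h1 : rw_ ≤ (wl.drop i).length := hrw ▸ pvRun_le _ _
        simp only [List.length_drop] at h1
        omega
      have hrsle : j + rs_ ≤ sl.length := by
        have h1 : rs_ ≤ (sl.drop j).length := hrs ▸ pvRun_le _ _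
        simp only [List.length_drop] at h1
        omega
      rw [pvLoop_eq wl sl (i + rw_) (j + rs_) hrwle hrsle]
      rw [List.drop_drop, List.drop_drop]
      congr 2
    · rw [if_pos (by omega), if_neg hcond]
      simp
  · rw [dif_neg h]
    by_cases hi' : i = wl.length
    · have hwd : wl.drop i = ([] : List Char) := by simp [hi']
      by_cases hj' : j = sl.length
      · have hsd : sl.drop j = ([] : List Char) := by simp [hj']
        rw [hwd, hsd, pvGoA_nil_nil]
        simp [hi', hj']
      · have hjlt : j < sl.length := by omega
        obtain ⟨c, rest, hsd⟩ : ∃ c rest, sl.drop j = c :: rest :=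
          ⟨_, _, List.drop_eq_getElem_cons hjlt⟩
        rw [hwd, hsd, pvGoA_nil_cons]
        simp
        omega
    · have hilt : i < wl.length := by omega
      have hj' : j = sl.length := by omega
      have hsd : sl.drop j = ([] : List Char) := by simp [hj']
      obtain ⟨c, rest, hwd⟩ : ∃ c rest, wl.drop i = c :: rest :=
        ⟨_, _, List.drop_eq_getElem_cons hilt⟩
      rw [hwd, hsd, pvGoA_cons_nil]
      simp
      omega
termination_by wl.length - i
decreasing_by omega

-- ===== VERDICT (by name: the statement is the Claim_ definition above) =====
theorem is_stretchy_spec : Claim_equal_is_stretchy := by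
  intro w s _
  show is_stretchy w s = is_stretchy_alt w s
  rw [is_stretchy, is_stretchy_alt]
  rw [pvLoop_eq w.toList s.toList 0 0 (Nat.zero_le _) (Nat.zero_le _)]
  simp
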